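-- pv_equiv track=rewrite | github.com/sasiddiqui/book-scraper | stores/sifatusafwa.py | ignore_url
-- ===== SOURCE A (Python) =====
-- def ignore_url(url) -> bool:
--     ig = [
--         "#",
--         "SubmitCurrency=",
--         "id_currency=",
--         ".jpg",
--         "/ar/",
--         "/fr/",
--         "order="
--     ]
--
--     return any(i in url for i in ig)
-- ===== SOURCE B (Python) =====
-- def ignore_url(url) -> bool:
--     ig = (
--         "#",
--         "SubmitCurrency=",
--         "id_currency=",
--         ".jpg",
--         "/ar/",
--         "/fr/",
--         "order="
--     )
--     # single left-to-right scan: at each position, test whether any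
--     # blacklisted string starts there (instead of seven whole-string substring scans)
--     for i in range(len(url) + 1):
--         for s in ig:
--             if url.startswith(s, i):
--                 return True
--     return False
-- ===== Notes on version B (the rewrite author's own statement) =====
-- stated objective: alternative
-- what changed: Replaces seven independent whole-string substring scans (one per blacklist entry) by a single left-to-right pass over the URL that at each position tests whether any blacklisted string starts there.
import Mathlib
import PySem

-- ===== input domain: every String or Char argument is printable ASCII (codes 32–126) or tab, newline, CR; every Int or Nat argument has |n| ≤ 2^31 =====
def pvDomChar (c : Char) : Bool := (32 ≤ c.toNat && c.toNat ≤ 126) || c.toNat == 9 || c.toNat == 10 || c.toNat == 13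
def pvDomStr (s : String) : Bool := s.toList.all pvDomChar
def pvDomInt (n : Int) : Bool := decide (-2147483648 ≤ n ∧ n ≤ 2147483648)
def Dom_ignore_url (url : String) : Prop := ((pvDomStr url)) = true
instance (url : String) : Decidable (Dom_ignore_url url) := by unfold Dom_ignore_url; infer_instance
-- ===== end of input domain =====

-- B replaces seven independent substring scans by one left-to-right pass that at
-- each position tests whether any blacklisted string starts there (alternative
-- decomposition, same exact result).


-- ===== PORT A =====
-- ig = [...]; return any(i in url for i in ig)
def ignore_url (url : String) : Bool :=
  ["#", "SubmitCurrency=", "id_currency=", ".jpg", "/ar/", "/fr/", "order="].any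
    (fun i => PySem.Str.isIn i url)

-- ===== PORT B =====
-- the blacklist tuple, as lists of characters
def pvBlacklist : List (List Char) :=
  ["#".toList, "SubmitCurrency=".toList, "id_currency=".toList, ".jpg".toList,
   "/ar/".toList, "/fr/".toList, "order=".toList]

-- the scan over positions i = 0 .. len(url): url.startswith(s, i) = s prefix of the suffix at i
def pvScan : List Char → Bool
  | [] => pvBlacklist.any (fun p => p.isPrefixOf ([] : List Char))
  | c :: t => pvBlacklist.any (fun p => p.isPrefixOf (c :: t)) || pvScan t

def ignore_url_alt (url : String) : Bool := pvScan url.toList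

-- ===== PRECONDITION & SPEC =====
def Spec_ignore_url (url : String) (out : Bool) : Prop := out = ignore_url_alt url
instance (url : String) (out : Bool) : Decidable (Spec_ignore_url url out) := by unfold Spec_ignore_url; infer_instance

-- ===== CLAIM (what is proved, stated in full; the proofs are below) =====
def Claim_equal_ignore_url : Prop := ∀ (url : String), Dom_ignore_url url → Spec_ignore_url url (ignore_url url)

-- ===== LEMMAS AND PROOFS =====
theorem pvScan_iff (cs : List Char) :
    pvScan cs = true ↔ ∃ p ∈ pvBlacklist, p <:+: cs := by
  induction cs with
  | nil =>
      simp [pvScan]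
  | cons c t ih =>
      simp only [pvScan, Bool.or_eq_true, List.any_eq_true, List.isPrefixOf_iff_prefix, ih]
      constructor
      · rintro (⟨p, hp, hpre⟩ | ⟨p, hp, hinf⟩)
        · exact ⟨p, hp, hpre.isInfix⟩
        · exact ⟨p, hp, hinf.trans (List.suffix_cons c t).isInfix⟩
      · rintro ⟨p, hp, hinf⟩
        rcases List.infix_cons_iff.mp hinf with h | h
        · exact Or.inl ⟨p, hp, h⟩
        · exact Or.inr ⟨p, hp, h⟩

-- ===== VERDICT (by name: the statement is the Claim_ definition above) =====
theorem ignore_url_spec : Claim_equal_ignore_url := by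
  intro url _
  show ignore_url url = ignore_url_alt url
  rw [Bool.eq_iff_iff]
  simp [ignore_url, ignore_url_alt, pvScan_iff, pvBlacklist,
        PySem.Chars.isIn_iff_infix]
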